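-- pv_equiv track=rewrite | github.com/joelmarsden/aoc2024 | src/21.py | nav_h
-- ===== SOURCE A (Python) =====
-- def nav_h(start_col, end_col):
--     directions = []
--     while start_col > end_col:
--         directions.append("<")
--         start_col -= 1
--     while start_col < end_col:
--         directions.append(">")
--         start_col += 1
--     return directions
-- ===== SOURCE B (Python) =====
-- def nav_h(start_col, end_col):
--     d = start_col - end_col
--     if d > 0:
--         return ["<"] * d
--     return [">"] * (-d)
-- ===== Notes on version B (the rewrite author's own statement) =====
-- stated objective: idiomatic
-- what changed: Replaces the two element-by-element while loops with a closed-form construction: compute the signed column distance once and build the arrow list by list multiplication.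
import Mathlib
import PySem

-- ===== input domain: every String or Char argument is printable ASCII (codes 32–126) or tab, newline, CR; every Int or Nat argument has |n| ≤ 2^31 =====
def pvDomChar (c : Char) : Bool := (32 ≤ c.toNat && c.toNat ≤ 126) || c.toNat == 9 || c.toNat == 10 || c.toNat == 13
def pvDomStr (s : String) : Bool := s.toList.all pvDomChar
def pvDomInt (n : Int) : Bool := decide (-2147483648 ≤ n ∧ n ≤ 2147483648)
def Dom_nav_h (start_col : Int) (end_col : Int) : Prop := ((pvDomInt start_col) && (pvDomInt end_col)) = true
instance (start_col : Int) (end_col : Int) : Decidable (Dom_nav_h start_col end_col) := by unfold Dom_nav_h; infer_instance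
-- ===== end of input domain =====

-- B replaces the two element-by-element while loops by a closed-form list construction
-- (signed distance computed once, result built with List.replicate); same cost class.

-- ===== PORT A =====
-- first while loop: append "<" and decrement start_col while start_col > end_col;
-- returns the appended directions and the final start_col
def navHGtLoop (start_col end_col : Int) : List String × Int :=
  if start_col > end_col then
    let r := navHGtLoop (start_col - 1) end_col
    ("<" :: r.1, r.2)
  else ([], start_col)
termination_by (start_col - end_col).toNat
decreasing_by omega

-- second while loop: append ">" and increment start_col while start_col < end_col
def navHLtLoop (start_col end_col : Int) : List String :=
  if start_col < end_col then ">" :: navHLtLoop (start_col + 1) end_col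
  else []
termination_by (end_col - start_col).toNat
decreasing_by omega

def nav_h (start_col : Int) (end_col : Int) : List String :=
  let r := navHGtLoop start_col end_col
  r.1 ++ navHLtLoop r.2 end_col

-- ===== PORT B =====
def nav_h_alt (start_col : Int) (end_col : Int) : List String :=
  let d := start_col - end_col
  if d > 0 then List.replicate d.toNat "<"
  else List.replicate (-d).toNat ">"

-- ===== PRECONDITION & SPEC =====
def Spec_nav_h (start_col : Int) (end_col : Int) (out : List String) : Prop := out = nav_h_alt start_col end_col
instance (start_col : Int) (end_col : Int) (out : List String) : Decidable (Spec_nav_h start_col end_col out) := by unfold Spec_nav_h; infer_instance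

-- ===== CLAIM (what is proved, stated in full; the proofs are below) =====
def Claim_equal_nav_h : Prop := ∀ (start_col : Int) (end_col : Int), Dom_nav_h start_col end_col → Spec_nav_h start_col end_col (nav_h start_col end_col)

-- ===== LEMMAS AND PROOFS =====
theorem navHGtLoop_eq (s e : Int) :
    navHGtLoop s e = (List.replicate (s - e).toNat "<", if s > e then e else s) := by
  generalize hn : (s - e).toNat = n
  induction n generalizing s with
  | zero =>
      have h : ¬ s > e := by omega
      rw [navHGtLoop, if_neg h]
      simp [h]
  | succ n ih =>
      have h : s > e := by omega
      rw [navHGtLoop, if_pos h, ih (s - 1) (by omega)]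
      simp only [List.replicate_succ]
      refine Prod.ext rfl ?_
      simp only [if_pos h]
      split_ifs <;> omega

theorem navHLtLoop_eq (s e : Int) :
    navHLtLoop s e = List.replicate (e - s).toNat ">" := by
  generalize hn : (e - s).toNat = n
  induction n generalizing s with
  | zero =>
      rw [navHLtLoop, if_neg (by omega)]
      simp
  | succ n ih =>
      have h : s < e := by omega
      rw [navHLtLoop, if_pos h, ih (s + 1) (by omega)]
      simp [List.replicate_succ]

-- ===== VERDICT (by name: the statement is the Claim_ definition above) =====
theorem nav_h_spec : Claim_equal_nav_h := by
  intro s e _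
  show nav_h s e = nav_h_alt s e
  unfold nav_h nav_h_alt
  by_cases h : s > e
  · simp [navHGtLoop_eq, navHLtLoop_eq, h]
  · have h0 : (s - e).toNat = 0 := by omega
    simp [navHGtLoop_eq, navHLtLoop_eq, h, h0]
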